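-- pv_equiv track=rewrite | github.com/rzi7/uts | no1.py | count_abc_deletions
-- ===== SOURCE A (Python) =====
-- def count_abc_deletions(s):
--     deletions = 0
--     i = 0
--
--     while i < len(s) - 2:
--         # Check if the current three characters form "abc"
--         if s[i:i+3] == 'abc':
--             # Increment the deletion count
--             deletions += 1
--             # Remove "abc" from the string
--             s = s[:i] + s[i+3:]
--             # Start checking again from the beginning of the string
--             i = 0
--         else:
--             # Move to the next character
--             i += 1
--
--     return deletions
-- ===== SOURCE B (Python) =====
-- def count_abc_deletions(s):
--     stack = []
--     count = 0
--     for ch in s: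
--         if ch == 'c' and stack[-2:] == ['a', 'b']:
--             stack.pop()
--             stack.pop()
--             count += 1
--         else:
--             stack.append(ch)
--     return count
-- ===== Notes on version B (the rewrite author's own statement) =====
-- stated objective: faster
-- what changed: Replaced the restart-from-zero delete-and-rescan while loop (quadratic rebuilding of the string) with a single left-to-right pass that keeps a stack, popping 'a','b' and counting whenever a 'c' completes an 'abc' on top.
import Mathlib
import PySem

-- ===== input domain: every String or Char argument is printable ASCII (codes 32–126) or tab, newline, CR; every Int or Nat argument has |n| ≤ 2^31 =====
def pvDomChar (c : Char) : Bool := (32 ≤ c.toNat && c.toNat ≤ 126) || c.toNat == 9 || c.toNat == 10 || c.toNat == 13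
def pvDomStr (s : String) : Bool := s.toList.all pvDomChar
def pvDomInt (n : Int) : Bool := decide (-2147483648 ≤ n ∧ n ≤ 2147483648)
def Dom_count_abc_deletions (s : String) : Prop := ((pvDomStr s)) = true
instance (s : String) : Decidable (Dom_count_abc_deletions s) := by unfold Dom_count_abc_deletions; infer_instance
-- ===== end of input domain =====

-- B replaces A's delete-"abc"-and-restart rescanning loop by a single pass with a stack
-- (pop 'a','b' and count when a 'c' completes "abc"); objective: faster.

-- ===== PORT A =====
-- A's while loop over (s, i, deletions); Python's i is always a natural number here
-- (it starts at 0 and is only ever reset to 0 or incremented), so it is carried as a Nat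
-- and the loop guard compares it as an Int, exactly as Python does.
def pvLoopA (l : List Char) (i : Nat) (d : Int) : Int :=
  if _h : (i : Int) < (l.length : Int) - 2 then
    if PySem.List.slice l (some (i : Int)) (some ((i : Int) + 3)) = ['a', 'b', 'c'] then
      pvLoopA (PySem.List.slice l none (some (i : Int)) ++
               PySem.List.slice l (some ((i : Int) + 3)) none) 0 (d + 1)
    else
      pvLoopA l (i + 1) d
  else
    d
termination_by (l.length, l.length - i)
decreasing_by
  · have h3 : ((i : Int) + 3) = (((i + 3 : Nat) : Int)) := by push_cast; ring
    rw [h3, PySem.List.slice_to_natCast, PySem.List.slice_from_natCast]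
    apply Prod.Lex.left
    simp only [List.length_append, List.length_take, List.length_drop]
    omega
  · apply Prod.Lex.right
    omega

def count_abc_deletions (s : String) : Int := pvLoopA s.toList 0 0

-- ===== PORT B =====
-- one step of B's for loop; the stack keeps its top at the head, so Python's
-- stack[-2:] == ['a','b'] is stack.take 2 = ['b','a'] and the two pops are drop 2
def pvStep (st : List Char × Int) (ch : Char) : List Char × Int :=
  if ch = 'c' ∧ st.1.take 2 = ['b', 'a'] then (st.1.drop 2, st.2 + 1)
  else (ch :: st.1, st.2)

def count_abc_deletions_alt (s : String) : Int := (s.toList.foldl pvStep ([], 0)).2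

-- ===== PRECONDITION & SPEC =====
def Spec_count_abc_deletions (s : String) (out : Int) : Prop := out = count_abc_deletions_alt s
instance (s : String) (out : Int) : Decidable (Spec_count_abc_deletions s out) := by unfold Spec_count_abc_deletions; infer_instance

-- ===== CLAIM (what is proved, stated in full; the proofs are below) =====
def Claim_equal_count_abc_deletions : Prop := ∀ (s : String), Dom_count_abc_deletions s → Spec_count_abc_deletions s (count_abc_deletions s)

-- ===== LEMMAS AND PROOFS =====

-- "abc" occurs in l starting at position j
def pvAbcAt (l : List Char) (j : Nat) : Prop := (l.drop j).take 3 = ['a', 'b', 'c']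

lemma pvAbcAt_le_length {l : List Char} {j : Nat} (h : pvAbcAt l j) : j + 3 ≤ l.length := by
  have := congrArg List.length h
  simp at this
  omega

-- the count component of B's fold is additive in the starting count,
-- and the stack component does not depend on it
lemma pvStep_count_add (l : List Char) (stk : List Char) (c : Int) :
    l.foldl pvStep (stk, c) = ((l.foldl pvStep (stk, 0)).1, c + (l.foldl pvStep (stk, 0)).2) := by
  induction l generalizing stk c with
  | nil => simp
  | cons x t ih =>
    simp only [List.foldl_cons]
    by_cases hx : x = 'c' ∧ stk.take 2 = ['b', 'a']
    · rw [show pvStep (stk, c) x = (stk.drop 2, c + 1) by simp [pvStep, hx],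
          show pvStep (stk, 0) x = (stk.drop 2, (0 : Int) + 1) by simp [pvStep, hx],
          ih (stk.drop 2) (c + 1), ih (stk.drop 2) ((0 : Int) + 1)]
      simp only [Prod.mk.injEq, zero_add]
      exact ⟨trivial, by ring⟩
    · rw [show pvStep (stk, c) x = (x :: stk, c) by simp [pvStep, hx],
          show pvStep (stk, 0) x = (x :: stk, (0 : Int)) by simp [pvStep, hx]]
      exact ih _ _

-- over a prefix containing no "abc" occurrence, B's fold never pops:
-- the stack is the reversed prefix and the count stays 0
lemma pvClean (l : List Char) (k : Nat) (h : ∀ j, j < k → ¬ pvAbcAt l j) :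
    (l.take k).foldl pvStep ([], 0) = ((l.take k).reverse, 0) := by
  induction k with
  | zero => simp
  | succ k ih =>
    by_cases hk : l.length ≤ k
    · rw [List.take_of_length_le (by omega : l.length ≤ k + 1)]
      have := ih (fun j hj => h j (by omega))
      rwa [List.take_of_length_le hk] at this
    · push_neg at hk
      have hih := ih (fun j hj => h j (by omega))
      have htk : l.take (k + 1) = l.take k ++ [l[k]] := by
        rw [List.take_add_one, List.getElem?_eq_getElem hk]
        rfl
      rw [htk]
      simp only [List.foldl_append, hih, List.foldl_cons, List.foldl_nil]
      have hnopop : ¬ (l[k] = 'c' ∧ ((l.take k).reverse).take 2 = ['b', 'a']) := by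
        rintro ⟨hc, htwo⟩
        -- the stack ends in …,'a','b', so "abc" occurs at k-2, contradicting h
        obtain ⟨rest, hrev⟩ : ∃ rest, (l.take k).reverse = 'b' :: 'a' :: rest := by
          rcases hm : (l.take k).reverse with _ | ⟨x, t⟩
          · rw [hm] at htwo; simp at htwo
          · rcases t with _ | ⟨y, rest⟩
            · rw [hm] at htwo; simp at htwo
            · rw [hm] at htwo
              simp at htwo
              exact ⟨rest, by rw [htwo.1, htwo.2]⟩
        have hk2 : k = rest.length + 2 := by
          have := congrArg List.length hrev
          simp at this
          omega
        have htake : l.take k = rest.reverse ++ ['a', 'b'] := by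
          rw [← List.reverse_reverse (l.take k), hrev]
          simp
        have hsplit : l = rest.reverse ++ ('a' :: 'b' :: l.drop k) := by
          conv_lhs => rw [← List.take_append_drop k l, htake]
          simp
        have hdrop : l.drop (k - 2) = 'a' :: 'b' :: l.drop k := by
          conv_lhs => rw [hsplit]
          rw [show k - 2 = rest.reverse.length by simp; omega]
          exact List.drop_left
        apply h (k - 2) (by omega)
        rw [pvAbcAt, hdrop, List.drop_eq_getElem_cons hk]
        simp [hc]
      rw [show pvStep ((l.take k).reverse, 0) l[k] = (l[k] :: (l.take k).reverse, 0) by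
            simp [pvStep, hnopop]]
      rw [List.reverse_append]
      rfl

-- key fact: if "abc" occurs at i and nowhere before it, B's count of l is one more
-- than B's count of l with that occurrence deleted
lemma pvCountDecomp (l : List Char) (i : Nat) (hpre : ∀ j, j < i → ¬ pvAbcAt l j)
    (habc : pvAbcAt l i) :
    (l.foldl pvStep ([], 0)).2 = 1 + ((l.take i ++ l.drop (i + 3)).foldl pvStep ([], 0)).2 := by
  have hsplit : l = l.take i ++ (['a', 'b', 'c'] ++ l.drop (i + 3)) := by
    conv_lhs => rw [← List.take_append_drop i l]
    congr 1
    conv_lhs => rw [← List.take_append_drop 3 (l.drop i)]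
    rw [habc, List.drop_drop]
  have hclean := pvClean l i hpre
  have habcstep : ∀ rest : List Char,
      (['a', 'b', 'c'] : List Char).foldl pvStep (rest, 0) = (rest, 1) := by
    intro rest
    simp only [List.foldl_cons, List.foldl_nil]
    rw [show pvStep (rest, 0) 'a' = ('a' :: rest, 0) by simp [pvStep],
        show pvStep (('a' : Char) :: rest, 0) 'b' = ('b' :: 'a' :: rest, 0) by simp [pvStep],
        show pvStep (('b' : Char) :: 'a' :: rest, 0) 'c' = (rest, (0 : Int) + 1) by simp [pvStep]]
    norm_num
  conv_lhs => rw [hsplit]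
  rw [List.foldl_append, hclean, List.foldl_append, habcstep,
      pvStep_count_add (l.drop (i + 3)) ((l.take i).reverse) 1,
      List.foldl_append, hclean, pvStep_count_add (l.drop (i + 3)) ((l.take i).reverse) 0]

-- A's loop invariant: if no "abc" occurs before position i, the loop returns d plus
-- B's stack count of the current string
lemma pvLoopA_eq (l : List Char) (i : Nat) (d : Int) :
    (∀ j, j < i → ¬ pvAbcAt l j) → pvLoopA l i d = d + (l.foldl pvStep ([], 0)).2 := by
  induction l, i, d using pvLoopA.induct with
  | case1 l i d hg hm ih =>
    intro hpre
    rw [pvLoopA, dif_pos hg, if_pos hm]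
    have hslice : PySem.List.slice l (some (i : Int)) (some ((i : Int) + 3)) =
        (l.drop i).take 3 := by simpa using PySem.List.slice_natCast_add l i 3
    have habc : pvAbcAt l i := by rw [pvAbcAt, ← hslice]; exact hm
    have h3 : ((i : Int) + 3) = (((i + 3 : Nat) : Int)) := by push_cast; ring
    rw [h3, PySem.List.slice_to_natCast, PySem.List.slice_from_natCast] at ih ⊢
    rw [ih (by intro j hj; omega)]
    rw [pvCountDecomp l i hpre habc]
    ring
  | case2 l i d hg hm ih =>
    intro hpre
    rw [pvLoopA, dif_pos hg, if_neg hm]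
    refine ih ?_
    intro j hj
    have hslice : PySem.List.slice l (some (i : Int)) (some ((i : Int) + 3)) =
        (l.drop i).take 3 := by simpa using PySem.List.slice_natCast_add l i 3
    rcases Nat.lt_succ_iff_lt_or_eq.mp hj with h | h
    · exact hpre j h
    · subst h
      rw [pvAbcAt, ← hslice]
      exact hm
  | case3 l i d hg =>
    intro hpre
    rw [pvLoopA, dif_neg hg]
    have hall : ∀ j, j < l.length → ¬ pvAbcAt l j := by
      intro j _ habc
      have := pvAbcAt_le_length habc
      by_cases hji : j < i
      · exact hpre j hji habc
      · omega
    have := pvClean l l.length hall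
    rw [List.take_of_length_le (le_refl _)] at this
    rw [this]
    simp

-- ===== VERDICT (by name: the statement is the Claim_ definition above) =====
theorem count_abc_deletions_spec : Claim_equal_count_abc_deletions := by
  intro s _
  unfold Spec_count_abc_deletions count_abc_deletions count_abc_deletions_alt
  rw [pvLoopA_eq s.toList 0 0 (by intro j hj; omega)]
  ring
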